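-- pv_equiv track=rewrite | github.com/schnell18/lm-quant-toolkit | src/lm_quant_toolkit/prep/wdist.py | _iter_qwen35_quant_keys
-- ===== SOURCE A (Python) =====
-- _LLM_QUANT_MODULES = [
--     "self_attn.q_proj",
--     "self_attn.k_proj",
--     "self_attn.v_proj",
--     "self_attn.o_proj",
--     "mlp.gate_proj",
--     "mlp.down_proj",
--     "mlp.up_proj",
-- ]
--
-- _QWEN35_FULL_ATTN_INTERVAL = 4
--
-- def _iter_qwen35_quant_keys(layers):
--     start = _QWEN35_FULL_ATTN_INTERVAL - 1
--     step = _QWEN35_FULL_ATTN_INTERVAL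
--     full_attn_layers = set(range(start, layers, step))
--     prefix = "model.language_model.layers"
--     for module in _LLM_QUANT_MODULES:
--         is_attn = module.startswith("self_attn.")
--         for layer in range(layers):
--             if is_attn and layer not in full_attn_layers:
--                 continue
--             yield module, layer, f"{prefix}.{layer}.{module}.weight"
-- ===== SOURCE B (Python) =====
-- _LLM_QUANT_MODULES = [
--     "self_attn.q_proj",
--     "self_attn.k_proj",
--     "self_attn.v_proj",
--     "self_attn.o_proj",
--     "mlp.gate_proj",
--     "mlp.down_proj",
--     "mlp.up_proj",
-- ]
--
-- _QWEN35_FULL_ATTN_INTERVAL = 4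
--
--
-- def _iter_qwen35_quant_keys(layers):
--     # Directly generate only the required layers per module: no full_attn_layers
--     # set, no scan over all layers with a filtering branch.
--     prefix = "model.language_model.layers"
--     for module in _LLM_QUANT_MODULES:
--         if module.startswith("self_attn."):
--             layer_iter = range(_QWEN35_FULL_ATTN_INTERVAL - 1, layers,
--                                _QWEN35_FULL_ATTN_INTERVAL)
--         else:
--             layer_iter = range(layers)
--         for layer in layer_iter:
--             yield module, layer, f"{prefix}.{layer}.{module}.weight"
-- ===== Notes on version B (the rewrite author's own statement) =====
-- stated objective: simpler
-- what changed: B drops the full_attn_layers set and the scan-all-layers-with-continue filter: for attention modules it iterates range(interval-1, layers, interval) directly, otherwise range(layers), generating exactly the required layers.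
import Mathlib
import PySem

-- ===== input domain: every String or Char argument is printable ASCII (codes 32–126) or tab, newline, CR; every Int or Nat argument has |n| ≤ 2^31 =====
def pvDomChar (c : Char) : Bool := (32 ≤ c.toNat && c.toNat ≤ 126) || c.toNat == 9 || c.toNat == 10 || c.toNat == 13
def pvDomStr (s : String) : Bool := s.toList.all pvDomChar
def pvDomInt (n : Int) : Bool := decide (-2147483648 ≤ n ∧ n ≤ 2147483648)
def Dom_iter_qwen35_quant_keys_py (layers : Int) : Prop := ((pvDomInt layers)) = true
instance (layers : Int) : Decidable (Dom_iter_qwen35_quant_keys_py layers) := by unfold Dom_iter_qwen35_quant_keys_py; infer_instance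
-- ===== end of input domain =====

-- B replaces A's "build a set of full-attention layers, scan all layers, skip with continue"
-- by directly generating only the required layers per module (simpler; same output).

-- _LLM_QUANT_MODULES (shared module-level constant)
def llmQuantModules : List String :=
  ["self_attn.q_proj", "self_attn.k_proj", "self_attn.v_proj", "self_attn.o_proj",
   "mlp.gate_proj", "mlp.down_proj", "mlp.up_proj"]

-- ===== PORT A =====
def iter_qwen35_quant_keys_py (layers : Int) : List (String × Int × String) :=
  let start : Int := 4 - 1
  let step : Int := 4
  let fullAttnLayers : PySem.Set Int := PySem.Set.ofList (PySem.List.pyRange start layers step)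
  let pfx : String := "model.language_model.layers"
  llmQuantModules.foldl (fun acc module =>
    let isAttn : Bool := PySem.Str.startswith module "self_attn."
    (PySem.List.pyRange 0 layers 1).foldl (fun acc2 layer =>
      if isAttn && !(fullAttnLayers.contains layer) then acc2
      else acc2 ++ [(module, layer,
        pfx ++ "." ++ PySem.Int.toStr layer ++ "." ++ module ++ ".weight")]) acc) []

-- ===== PORT B =====
def iter_qwen35_quant_keys_py_alt (layers : Int) : List (String × Int × String) :=
  let pfx : String := "model.language_model.layers"
  llmQuantModules.flatMap (fun module =>
    (if PySem.Str.startswith module "self_attn." then PySem.List.pyRange (4 - 1) layers 4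
     else PySem.List.pyRange 0 layers 1).map (fun layer =>
      (module, layer, pfx ++ "." ++ PySem.Int.toStr layer ++ "." ++ module ++ ".weight")))

-- ===== PRECONDITION & SPEC =====
def Spec_iter_qwen35_quant_keys_py (layers : Int) (out : List (String × Int × String)) : Prop := out = iter_qwen35_quant_keys_py_alt layers
instance (layers : Int) (out : List (String × Int × String)) : Decidable (Spec_iter_qwen35_quant_keys_py layers out) := by unfold Spec_iter_qwen35_quant_keys_py; infer_instance

-- ===== CLAIM (what is proved, stated in full; the proofs are below) =====
def Claim_equal_iter_qwen35_quant_keys_py : Prop := ∀ (layers : Int), Dom_iter_qwen35_quant_keys_py layers → Spec_iter_qwen35_quant_keys_py layers (iter_qwen35_quant_keys_py layers)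

-- ===== LEMMAS AND PROOFS =====

-- appending one step to a step-4 range
lemma pyRange4_succ (m : Int) (h : 0 ≤ m) :
    PySem.List.pyRange 3 (m + 1) 4 =
      PySem.List.pyRange 3 m 4 ++ (if m % 4 = 3 then [m] else []) := by
  rw [PySem.List.pyRange_of_pos 3 (m + 1) (by norm_num),
      PySem.List.pyRange_of_pos 3 m (by norm_num)]
  have hc1 : (if (3:Int) < m + 1 then ((m + 1 - 3 + 4 - 1) / 4).toNat else 0) = ((m + 1) / 4).toNat := by
    split <;> omega
  have hc2 : (if (3:Int) < m then ((m - 3 + 4 - 1) / 4).toNat else 0) = (m / 4).toNat := by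
    split <;> omega
  rw [hc1, hc2]
  by_cases hm : m % 4 = 3
  · have : ((m + 1) / 4).toNat = (m / 4).toNat + 1 := by omega
    rw [this, List.range_succ, List.map_append, if_pos hm]
    congr 1
    simp only [List.map_cons, List.map_nil]
    congr 1
    omega
  · have : ((m + 1) / 4).toNat = (m / 4).toNat := by omega
    rw [this, if_neg hm, List.append_nil]

-- filtering the full range by "layer % 4 = 3" yields exactly range(3, n, 4)
lemma filter_mod_eq_pyRange4 (n : Int) :
    (PySem.List.pyRange 0 n 1).filter (fun l => decide (l % 4 = 3)) = PySem.List.pyRange 3 n 4 := by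
  by_cases hn : n ≤ 0
  · rw [PySem.List.pyRange_one_eq_nil hn, PySem.List.pyRange_of_pos 3 n (by norm_num)]
    rw [if_neg (by omega)]
    simp
  · have hn' : n = ((n.toNat : Int)) := by omega
    rw [hn']
    induction n.toNat with
    | zero =>
      rw [show (((0:Nat):Int)) = (0:Int) from rfl, PySem.List.pyRange_one_eq_nil le_rfl,
        PySem.List.pyRange_of_pos 3 0 (s := 4) (by norm_num), if_neg (by omega)]
      simp
    | succ m ih =>
      have hstep : ((m + 1 : Nat) : Int) = (m : Int) + 1 := by push_cast; ring
      rw [hstep, PySem.List.pyRange_one_succ_right (by positivity),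
          List.filter_append, ih, pyRange4_succ (m : Int) (by positivity)]
      congr 1
      by_cases hm : ((m : Int)) % 4 = 3 <;> simp [hm]

-- filtering by membership in set(range(3, n, 4)) yields exactly range(3, n, 4)
lemma filter_mem_eq_pyRange4 (n : Int) :
    (PySem.List.pyRange 0 n 1).filter
      (fun l => (PySem.Set.ofList (PySem.List.pyRange 3 n 4)).contains l) = PySem.List.pyRange 3 n 4 := by
  rw [List.filter_congr (q := fun l => decide (l % 4 = 3)) ?_, filter_mod_eq_pyRange4]
  intro l hl
  rw [PySem.List.mem_pyRange_one] at hl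
  have hmem : (PySem.Set.ofList (PySem.List.pyRange 3 n 4)).contains l =
      decide (l ∈ PySem.Set.ofList (PySem.List.pyRange 3 n 4)) := by
    simp
  rw [hmem]
  apply decide_eq_decide.mpr
  rw [PySem.Set.mem_ofList, PySem.List.mem_pyRange_iff_of_pos (by norm_num)]
  omega

-- per-module inner loop of A equals B's directly generated layer list
lemma inner_eq (n : Int) (b : Bool) :
    (PySem.List.pyRange 0 n 1).filter
      (fun l => !(b && !((PySem.Set.ofList (PySem.List.pyRange 3 n 4)).contains l))) =
      (if b then PySem.List.pyRange 3 n 4 else PySem.List.pyRange 0 n 1) := by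
  cases b
  · simp
  · simp only [Bool.true_and, Bool.not_not, if_pos]
    exact filter_mem_eq_pyRange4 n

-- ===== VERDICT (by name: the statement is the Claim_ definition above) =====
theorem iter_qwen35_quant_keys_py_spec : Claim_equal_iter_qwen35_quant_keys_py := by
  intro layers _
  show iter_qwen35_quant_keys_py layers = iter_qwen35_quant_keys_py_alt layers
  unfold iter_qwen35_quant_keys_py iter_qwen35_quant_keys_py_alt
  simp only []
  have hbody : ∀ (module : String) (acc : List (String × Int × String)),
      (PySem.List.pyRange 0 layers 1).foldl (fun acc2 layer =>
        if PySem.Str.startswith module "self_attn." &&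
            !((PySem.Set.ofList (PySem.List.pyRange (4 - 1) layers 4)).contains layer) then acc2
        else acc2 ++ [(module, layer,
          "model.language_model.layers" ++ "." ++ PySem.Int.toStr layer ++ "." ++ module ++ ".weight")]) acc
      = acc ++ (if PySem.Str.startswith module "self_attn." then PySem.List.pyRange (4 - 1) layers 4
          else PySem.List.pyRange 0 layers 1).map (fun layer =>
            (module, layer,
              "model.language_model.layers" ++ "." ++ PySem.Int.toStr layer ++ "." ++ module ++ ".weight")) := by
    intro module acc
    have hfun : (fun (acc2 : List (String × Int × String)) (layer : Int) =>
        if PySem.Str.startswith module "self_attn." &&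
            !((PySem.Set.ofList (PySem.List.pyRange (4 - 1) layers 4)).contains layer) then acc2
        else acc2 ++ [(module, layer,
          "model.language_model.layers" ++ "." ++ PySem.Int.toStr layer ++ "." ++ module ++ ".weight")])
        = (fun (acc2 : List (String × Int × String)) (layer : Int) =>
        if (!(PySem.Str.startswith module "self_attn." &&
            !((PySem.Set.ofList (PySem.List.pyRange (4 - 1) layers 4)).contains layer))) then acc2 ++ [(module, layer,
          "model.language_model.layers" ++ "." ++ PySem.Int.toStr layer ++ "." ++ module ++ ".weight")]
        else acc2) := by
      funext acc2 layer
      cases h : (PySem.Str.startswith module "self_attn." &&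
            !((PySem.Set.ofList (PySem.List.pyRange (4 - 1) layers 4)).contains layer)) <;> simp_all
    rw [hfun, PySem.List.foldl_append_if]
    congr 1
    have : ((4:Int) - 1) = 3 := by norm_num
    rw [this]
    exact congrArg _ (inner_eq layers _)
  have main : ∀ (ms : List String) (acc : List (String × Int × String)),
      ms.foldl (fun acc module =>
        (PySem.List.pyRange 0 layers 1).foldl (fun acc2 layer =>
          if PySem.Str.startswith module "self_attn." &&
              !((PySem.Set.ofList (PySem.List.pyRange (4 - 1) layers 4)).contains layer) then acc2
          else acc2 ++ [(module, layer,
            "model.language_model.layers" ++ "." ++ PySem.Int.toStr layer ++ "." ++ module ++ ".weight")]) acc) acc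
      = acc ++ ms.flatMap (fun module =>
          (if PySem.Str.startswith module "self_attn." then PySem.List.pyRange (4 - 1) layers 4
            else PySem.List.pyRange 0 layers 1).map (fun layer =>
              (module, layer,
                "model.language_model.layers" ++ "." ++ PySem.Int.toStr layer ++ "." ++ module ++ ".weight"))) := by
    intro ms
    induction ms with
    | nil => intro acc; simp
    | cons m ms ih =>
      intro acc
      rw [List.foldl_cons, hbody m acc, ih, List.flatMap_cons, List.append_assoc]
  exact (main llmQuantModules []).trans (List.nil_append _)
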